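-- pv_equiv track=rewrite | github.com/J-khol-R/min_max_Algorithm | linjaGame.py | hayBloqueos
-- ===== SOURCE A (Python) =====
-- def hayBloqueos(matriz):
--     filas = len(matriz)
--     columnas = len(matriz[0])
--
--     for columna in range(1, columnas - 1):
--         if all(matriz[fila][columna] != 0 for fila in range(filas)):
--             # La columna está llena, ahora cuenta los 1 y 2
--             contador_1 = sum(1 for fila in range(filas) if matriz[fila][columna] == 1)
--             contador_2 = sum(1 for fila in range(filas) if matriz[fila][columna] == 2)
--
--             return True, contador_1, contador_2
--
--     # Si no se encontró ninguna columna llena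
--     return False, None, None
-- ===== SOURCE B (Python) =====
-- def hayBloqueos(matriz):
--     # Row-major accumulation: one pass over the rows updating a vector of
--     # per-interior-column accumulators (zero-seen flag, count of 1s, count of 2s),
--     # then pick the first interior column whose flag stayed False.
--     columnas = len(matriz[0])
--     stats = [(False, 0, 0)] * (columnas - 2)
--     for fila in matriz:
--         stats = [(z or fila[c + 1] == 0,
--                   c1 + (fila[c + 1] == 1),
--                   c2 + (fila[c + 1] == 2))
--                  for c, (z, c1, c2) in enumerate(stats)]
--     for z, c1, c2 in stats:
--         if not z:
--             return True, c1, c2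
--     return False, None, None
-- ===== Notes on version B (the rewrite author's own statement) =====
-- stated objective: alternative
-- what changed: A scans column-by-column with short-circuit (an all() pass plus two counting sums per candidate column); B traverses the matrix row-by-row in a single pass, maintaining a vector of per-interior-column accumulators (zero flag, count of 1s, count of 2s), and only afterwards selects the first column whose flag stayed False.
-- outside the precondition, e.g. on hayBloqueos([]): A raises IndexError, B raises IndexError; on hayBloqueos([[0, 0, 0], [0]]): A returns (False, None, None), B raises IndexError
import Mathlib
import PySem

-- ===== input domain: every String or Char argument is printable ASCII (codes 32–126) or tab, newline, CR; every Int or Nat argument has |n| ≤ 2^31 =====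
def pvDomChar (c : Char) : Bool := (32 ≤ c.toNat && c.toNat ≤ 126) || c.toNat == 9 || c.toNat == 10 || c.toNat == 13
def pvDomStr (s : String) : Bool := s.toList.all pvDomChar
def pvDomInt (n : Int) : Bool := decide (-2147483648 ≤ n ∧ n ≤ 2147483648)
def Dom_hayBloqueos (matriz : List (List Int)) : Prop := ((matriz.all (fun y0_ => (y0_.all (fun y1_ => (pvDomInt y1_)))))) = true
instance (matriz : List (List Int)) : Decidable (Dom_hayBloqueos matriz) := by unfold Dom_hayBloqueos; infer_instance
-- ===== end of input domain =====

-- B replaces A's column-by-column scan (all() plus two counting sums per candidate column,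
-- with early return) by a single row-major pass that maintains a vector of per-interior-column
-- accumulators, selecting the qualifying column only afterwards (alternative decomposition).

-- ===== PORT A =====
-- matriz[fila][columna] (both indices nonnegative here; out-of-range would raise in Python and is excluded by Pre_)
def pvCell (matriz : List (List Int)) (f c : Int) : Int :=
  PySem.List.pyGetD (PySem.List.pyGetD matriz f []) c 0

def hayBloqueosGo (matriz : List (List Int)) (filas : Int) :
    List Int → Bool × Option Int × Option Int
  | [] => (false, none, none)
  | c :: rest =>
    if (PySem.List.pyRange 0 filas 1).all (fun f => pvCell matriz f c != 0) then
      let contador_1 : Int :=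
        (PySem.List.pyRange 0 filas 1).foldl
          (fun acc f => if pvCell matriz f c = 1 then acc + 1 else acc) 0
      let contador_2 : Int :=
        (PySem.List.pyRange 0 filas 1).foldl
          (fun acc f => if pvCell matriz f c = 2 then acc + 1 else acc) 0
      (true, some contador_1, some contador_2)
    else hayBloqueosGo matriz filas rest

def hayBloqueos (matriz : List (List Int)) : Bool × Option Int × Option Int :=
  let filas : Int := matriz.length
  let columnas : Int := (PySem.List.pyGetD matriz 0 []).length
  hayBloqueosGo matriz filas (PySem.List.pyRange 1 (columnas - 1) 1)

-- ===== PORT B =====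
-- one row updates the accumulator vector (the list comprehension over enumerate(stats))
def altStep (fila : List Int) (stats : List (Bool × Int × Int)) : List (Bool × Int × Int) :=
  (PySem.List.enumerate stats).map (fun p =>
    let v := PySem.List.pyGetD fila (p.1 + 1) 0
    (p.2.1 || (v == 0),
     p.2.2.1 + (if v = 1 then 1 else 0),
     p.2.2.2 + (if v = 2 then 1 else 0)))

-- the final selection loop over the accumulator vector
def altPick : List (Bool × Int × Int) → Bool × Option Int × Option Int
  | [] => (false, none, none)
  | st :: rest => if st.1 then altPick rest else (true, some st.2.1, some st.2.2)

def hayBloqueos_alt (matriz : List (List Int)) : Bool × Option Int × Option Int :=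
  let columnas : Int := (PySem.List.pyGetD matriz 0 []).length
  let stats0 : List (Bool × Int × Int) :=
    List.replicate (columnas - 2).toNat (false, 0, 0)
  altPick (matriz.foldl (fun st fila => altStep fila st) stats0)

-- ===== PRECONDITION & SPEC =====
-- Pre_ excludes the inputs on which Python A raises IndexError: the empty matrix
-- (len(matriz[0])) and ragged matrices whose short rows A's column scan reaches.
-- It also excludes a few ragged matrices on which A happens to return (False, None, None)
-- only because a zero in an earlier row short-circuits all() before the short row is
-- indexed — there A's survival is an accident of generator short-circuiting (see cites).
def Pre_hayBloqueos (matriz : List (List Int)) : Prop :=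
  matriz ≠ [] ∧ (3 ≤ (matriz.headD []).length →
    ∀ row ∈ matriz, (matriz.headD []).length ≤ row.length + 1)
instance (matriz : List (List Int)) : Decidable (Pre_hayBloqueos matriz) := by
  unfold Pre_hayBloqueos; infer_instance

def pvWitness_hayBloqueos : List (List Int) := [[0, 1, 2], [3, 1, 0]]

def Spec_hayBloqueos (matriz : List (List Int)) (out : Bool × Option Int × Option Int) : Prop :=
  out = hayBloqueos_alt matriz
instance (matriz : List (List Int)) (out : Bool × Option Int × Option Int) :
    Decidable (Spec_hayBloqueos matriz out) := by unfold Spec_hayBloqueos; infer_instance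

-- ===== CLAIM (what is proved, stated in full; the proofs are below) =====
def Claim_equal_hayBloqueos : Prop :=
  ∀ (matriz : List (List Int)), Dom_hayBloqueos matriz → Pre_hayBloqueos matriz →
    Spec_hayBloqueos matriz (hayBloqueos matriz)

-- ===== LEMMAS AND PROOFS =====

-- the per-column aggregate of a set of rows at column c
def pvAgg (rows : List (List Int)) (c : Int) : Bool × Int × Int :=
  (rows.any (fun r => PySem.List.pyGetD r c 0 == 0),
   rows.foldl (fun acc r => if PySem.List.pyGetD r c 0 = 1 then acc + 1 else acc) 0,
   rows.foldl (fun acc r => if PySem.List.pyGetD r c 0 = 2 then acc + 1 else acc) 0)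

-- A's all() over row indices equals all() over the rows themselves
theorem allA_eq (matriz : List (List Int)) (c : Int) :
    ((PySem.List.pyRange 0 (matriz.length : Int) 1).all
        (fun f => pvCell matriz f c != 0))
      = matriz.all (fun row => PySem.List.pyGetD row c 0 != 0) := by
  have h := PySem.List.map_pyGetD_pyRange_zero' matriz ([] : List Int)
  calc ((PySem.List.pyRange 0 (matriz.length : Int) 1).all
          (fun f => pvCell matriz f c != 0))
      = (((PySem.List.pyRange 0 (matriz.length : Int) 1).map
            (fun f => PySem.List.pyGetD matriz f [])).all
          (fun row => PySem.List.pyGetD row c 0 != 0)) := by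
        rw [List.all_map]; rfl
    _ = matriz.all (fun row => PySem.List.pyGetD row c 0 != 0) := by rw [h]

-- A's counting sum over row indices equals a fold over the rows
theorem countA_eq (matriz : List (List Int)) (c k : Int) :
    ((PySem.List.pyRange 0 (matriz.length : Int) 1).foldl
        (fun acc f => if pvCell matriz f c = k then acc + 1 else acc) (0 : Int))
      = matriz.foldl (fun acc row => if PySem.List.pyGetD row c 0 = k then acc + 1 else acc) 0 := by
  exact PySem.List.foldl_pyRange_zero_pyGetD' matriz ([] : List Int)
    (fun acc row => if PySem.List.pyGetD row c 0 = k then acc + 1 else acc) 0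

-- enumerate of a map distributes
theorem enumerate_map_pv {α β : Type} (f : α → β) (xs : List α) (s : Int) :
    PySem.List.enumerate (xs.map f) s
      = (PySem.List.enumerate xs s).map (fun p => (p.1, f p.2)) := by
  induction xs generalizing s with
  | nil => simp [PySem.List.enumerate_nil]
  | cons x xs ih => simp [PySem.List.enumerate_cons, ih]

-- enumerating an enumeration re-attaches the same indices
theorem enumerate_enumerate_pv {α : Type} (xs : List α) (s : Int) :
    PySem.List.enumerate (PySem.List.enumerate xs s) s
      = (PySem.List.enumerate xs s).map (fun p => (p.1, p)) := by
  induction xs generalizing s with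
  | nil => simp [PySem.List.enumerate_nil]
  | cons x xs ih => simp [PySem.List.enumerate_cons, ih]

-- the row-major fold computes, at each slot, the aggregate of column (index + 1)
theorem fold_stats (rows : List (List Int)) (init : List (Bool × Int × Int)) :
    rows.foldl (fun st fila => altStep fila st) init
      = (PySem.List.enumerate init).map (fun p =>
          (p.2.1 || rows.any (fun r => PySem.List.pyGetD r (p.1 + 1) 0 == 0),
           rows.foldl (fun acc r => if PySem.List.pyGetD r (p.1 + 1) 0 = 1 then acc + 1 else acc) p.2.2.1,
           rows.foldl (fun acc r => if PySem.List.pyGetD r (p.1 + 1) 0 = 2 then acc + 1 else acc) p.2.2.2)) := by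
  induction rows generalizing init with
  | nil =>
    simp only [List.foldl_nil, List.any_nil, Bool.or_false]
    have : (PySem.List.enumerate init).map
        (fun p : Int × (Bool × Int × Int) => (p.2.1, p.2.2.1, p.2.2.2))
        = (PySem.List.enumerate init).map (fun p => p.2) := by
      apply List.map_congr_left; intro p _; rfl
    rw [this, PySem.List.map_snd_enumerate]
  | cons r rest ih =>
    rw [List.foldl_cons, ih]
    unfold altStep
    rw [enumerate_map_pv, enumerate_enumerate_pv, List.map_map, List.map_map]
    apply List.map_congr_left
    intro p _
    obtain ⟨i, z, x, y⟩ := p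
    refine congrArg₂ Prod.mk ?_ (congrArg₂ Prod.mk ?_ ?_)
    · rw [List.any_cons, Bool.or_assoc]
    · rw [List.foldl_cons]
      congr 1
      simp only
      split_ifs <;> ring
    · rw [List.foldl_cons]
      congr 1
      simp only
      split_ifs <;> ring

-- enumerate of a replicate is a range paired with the constant
theorem enum_replicate_pv {α : Type} (n : Nat) (x : α) (s : Int) :
    PySem.List.enumerate (List.replicate n x) s
      = (PySem.List.pyRange s (s + n) 1).map (fun j => (j, x)) := by
  induction n generalizing s with
  | zero => simp [PySem.List.enumerate_nil, PySem.List.pyRange_one_eq_nil]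
  | succ m ih =>
    have hb : (s + ((m + 1 : Nat) : Int)) = (s + 1) + (m : Int) := by push_cast; omega
    rw [List.replicate_succ, PySem.List.enumerate_cons, hb,
        PySem.List.pyRange_one_cons (show s < s + 1 + (m : Int) by omega),
        List.map_cons, ih]

-- A's column loop over any column list equals the pick over the aggregates of those columns
theorem go_pick (matriz : List (List Int)) (cs : List Int) :
    hayBloqueosGo matriz (matriz.length : Int) cs = altPick (cs.map (pvAgg matriz)) := by
  induction cs with
  | nil => rfl
  | cons c rest ih =>
    have hall : ((PySem.List.pyRange 0 (matriz.length : Int) 1).all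
          (fun f => pvCell matriz f c != 0))
        = !(matriz.any (fun row => PySem.List.pyGetD row c 0 == 0)) := by
      rw [allA_eq]
      simp [List.all_eq_not_any_not, bne]
    have h1 : (pvAgg matriz c).1 = matriz.any (fun row => PySem.List.pyGetD row c 0 == 0) := rfl
    rw [hayBloqueosGo, List.map_cons, altPick, hall, h1]
    cases h : matriz.any (fun row => PySem.List.pyGetD row c 0 == 0) with
    | true => simp [ih]
    | false => simp [h, countA_eq, pvAgg]

-- ===== VERDICT (by name: the statement is the Claim_ definition above) =====
theorem hayBloqueos_spec : Claim_equal_hayBloqueos := by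
  intro matriz _ _
  unfold Spec_hayBloqueos hayBloqueos hayBloqueos_alt
  simp only
  rw [fold_stats, enum_replicate_pv, List.map_map, go_pick]
  set columnas : Int := ((PySem.List.pyGetD matriz 0 []).length : Int) with hc
  by_cases h2 : columnas ≤ 2
  · -- no interior columns on either side
    have hn : (columnas - 2).toNat = 0 := by omega
    have hr : PySem.List.pyRange 1 (columnas - 1) 1 = [] :=
      PySem.List.pyRange_one_eq_nil (by omega)
    simp [hn, hr, PySem.List.pyRange_one_eq_nil, altPick]
  · -- columnas ≥ 3: shift the range by one
    have h1 : (0 : Int) + ((columnas - 2).toNat : Int) = columnas - 2 := by omega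
    rw [h1]
    rw [PySem.List.pyRange_one, PySem.List.pyRange_one, List.map_map, List.map_map]
    have hn : (columnas - 2 - 0).toNat = (columnas - 1 - 1).toNat := by omega
    rw [hn]
    refine congrArg altPick (List.map_congr_left ?_)
    intro k _
    simp only [Function.comp]
    have h4 : (1 : ℤ) + (k : ℤ) = (k : ℤ) + 1 := by ring
    simp [pvAgg, h4]
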